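-- pv_equiv track=rewrite | github.com/cayomesquita/ciccc_102_python_algoritms | 15_Recursion/recursion_exercise.py | all_star
-- ===== SOURCE A (Python) =====
-- def all_star(string):
--     """
--     Given a string, compute recursively a new string where all the adjacent chars are now separated by a "*".
--
--     all_star("hello") -> "h*e*l*l*o"
--     all_star("abc") -> "a*b*c"
--     all_star("ab") -> "a*b"
--     all_star("3.14") -> "3*.*1*4"
--     all_star("a") -> "a"
--     all_star("") -> ""
--     """
--     if len(string) <= 1:
--         return string
--     half = len(string) // 2
--     part_1 = string[:half]
--     part_2 = string[half:]
--     if part_1[-1] == "*" or part_2[0] == "*":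
--         return all_star(part_1) + all_star(part_2)
--     else:
--         return all_star(part_1) + "*" + all_star(part_2)
-- ===== SOURCE B (Python) =====
-- def all_star(string):
--     # single linear pass: emit each char, inserting "*" between neighbours
--     # unless either neighbour is itself "*"
--     if not string:
--         return ""
--     parts = [string[0]]
--     for prev, cur in zip(string, string[1:]):
--         if prev != "*" and cur != "*":
--             parts.append("*")
--         parts.append(cur)
--     return "".join(parts)
-- ===== Notes on version B (the rewrite author's own statement) =====
-- stated objective: faster
-- what changed: Replaced A's halving divide-and-conquer recursion (slicing both halves at every level) with one linear pass over adjacent character pairs that inserts '*' unless either neighbour is '*'.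
import Mathlib
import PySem

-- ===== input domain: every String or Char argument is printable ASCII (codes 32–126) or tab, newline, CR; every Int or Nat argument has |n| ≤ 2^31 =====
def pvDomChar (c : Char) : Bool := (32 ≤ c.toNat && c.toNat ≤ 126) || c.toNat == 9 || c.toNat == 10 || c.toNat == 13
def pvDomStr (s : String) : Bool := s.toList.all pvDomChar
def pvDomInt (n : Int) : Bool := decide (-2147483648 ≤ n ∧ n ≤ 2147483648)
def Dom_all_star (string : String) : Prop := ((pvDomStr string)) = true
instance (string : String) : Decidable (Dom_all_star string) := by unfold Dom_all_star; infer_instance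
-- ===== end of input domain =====

-- B replaces A's divide-and-conquer recursion with a single linear pass over adjacent pairs (alternative; same output).


-- ===== PORT A =====
-- string[:half] / string[half:] with 0 ≤ half ≤ len are exactly take/drop (PySem.List.slice_to / slice_from);
-- part_1[-1] / part_2[0] are PySem.List.pyGet? with index -1 / 0.
def allStarACore (l : List Char) : List Char :=
  if l.length ≤ 1 then l
  else
    let half := l.length / 2
    let p1 := l.take half
    let p2 := l.drop half
    if PySem.List.pyGet? p1 (-1) = some '*' ∨ PySem.List.pyGet? p2 0 = some '*' then
      allStarACore p1 ++ allStarACore p2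
    else
      allStarACore p1 ++ '*' :: allStarACore p2
termination_by l.length
decreasing_by
  · simp only [List.length_take]; omega
  · simp only [List.length_drop]; omega
  · simp only [List.length_take]; omega
  · simp only [List.length_drop]; omega

def all_star (string : String) : String := String.ofList (allStarACore string.toList)

-- ===== PORT B =====
-- Source B: seed with the first char, then one pass over zip(string, string[1:]).
def allStarBCore (l : List Char) : List Char :=
  match l with
  | [] => []
  | c :: rest =>
    (l.zip rest).foldl
      (fun acc p => acc ++ (if p.1 ≠ '*' ∧ p.2 ≠ '*' then ['*'] else []) ++ [p.2]) [c]

def all_star_alt (string : String) : String := String.ofList (allStarBCore string.toList)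

-- ===== PRECONDITION & SPEC =====
def Spec_all_star (string : String) (out : String) : Prop := out = all_star_alt string
instance (string : String) (out : String) : Decidable (Spec_all_star string out) := by unfold Spec_all_star; infer_instance

-- ===== CLAIM (what is proved, stated in full; the proofs are below) =====
def Claim_equal_all_star : Prop := ∀ (string : String), Dom_all_star string → Spec_all_star string (all_star string)

-- ===== LEMMAS AND PROOFS =====

-- recursive characterisation of B's pair pass: output after a char `c` followed by `rest`
def pairsOut (c : Char) (rest : List Char) : List Char :=
  match rest with
  | [] => []
  | d :: t => (if c ≠ '*' ∧ d ≠ '*' then ['*'] else []) ++ d :: pairsOut d t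

theorem foldl_pairs (rest : List Char) : ∀ (c : Char) (acc : List Char),
    ((c :: rest).zip rest).foldl
      (fun acc p => acc ++ (if p.1 ≠ '*' ∧ p.2 ≠ '*' then ['*'] else []) ++ [p.2]) acc
      = acc ++ pairsOut c rest := by
  induction rest with
  | nil => intro c acc; simp [pairsOut]
  | cons d t ih =>
    intro c acc
    simp only [List.zip_cons_cons, List.foldl_cons, pairsOut, ih]
    simp

theorem allStarBCore_eq (c : Char) (rest : List Char) :
    allStarBCore (c :: rest) = c :: pairsOut c rest := by
  simp only [allStarBCore]
  rw [foldl_pairs]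
  rfl

theorem pairsOut_append (xr : List Char) : ∀ (c y : Char) (yr : List Char),
    pairsOut c (xr ++ y :: yr)
      = pairsOut c xr
        ++ (if (c :: xr).getLast? ≠ some '*' ∧ y ≠ '*' then ['*'] else [])
        ++ y :: pairsOut y yr := by
  induction xr with
  | nil => intro c y yr; simp [pairsOut]
  | cons d t ih =>
    intro c y yr
    simp only [List.cons_append, pairsOut, ih]
    have : (c :: d :: t).getLast? = (d :: t).getLast? := by
      simp [List.getLast?_cons_cons]
    rw [this]
    simp

-- the bridge: B on a split input, with A's boundary test on the two pieces
theorem bCore_append (xs ys : List Char) (hx : xs ≠ []) (hy : ys ≠ []) :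
    allStarBCore (xs ++ ys)
      = if PySem.List.pyGet? xs (-1) = some '*' ∨ PySem.List.pyGet? ys 0 = some '*' then
          allStarBCore xs ++ allStarBCore ys
        else
          allStarBCore xs ++ '*' :: allStarBCore ys := by
  obtain ⟨c, xr, rfl⟩ := List.exists_cons_of_ne_nil hx
  obtain ⟨y, yr, rfl⟩ := List.exists_cons_of_ne_nil hy
  have hA : PySem.List.pyGet? (c :: xr) (-1) = (c :: xr).getLast? := by
    simp [PySem.List.pyGet?, PySem.List.pyIdx?]
    rw [List.getLast?_eq_getElem?]
    simp
  have hB : PySem.List.pyGet? (y :: yr) 0 = some y := by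
    simp [PySem.List.pyGet?, PySem.List.pyIdx?]
  rw [List.cons_append, allStarBCore_eq, pairsOut_append, allStarBCore_eq, allStarBCore_eq,
    hA, hB]
  rcases h : (c :: xr).getLast? with _ | z
  · simp at h
  · by_cases hz : z = '*' <;> by_cases hy' : y = '*' <;> simp [hz, hy']

theorem core_eq : ∀ (n : Nat) (l : List Char), l.length = n → allStarACore l = allStarBCore l := by
  intro n
  induction n using Nat.strong_induction_on with
  | _ n ih =>
    intro l hn
    rw [allStarACore]
    by_cases h1 : l.length ≤ 1
    · simp only [h1, if_true]
      match l, h1 with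
      | [], _ => simp [allStarBCore]
      | [c], _ => simp [allStarBCore]
    · simp only [h1, if_false]
      have hlen : 2 ≤ l.length := by omega
      have hh1 : 1 ≤ l.length / 2 := by omega
      have hh2 : l.length / 2 < l.length := by omega
      have hx : l.take (l.length / 2) ≠ [] :=
        List.ne_nil_of_length_pos (by rw [List.length_take]; omega)
      have hy : l.drop (l.length / 2) ≠ [] :=
        List.ne_nil_of_length_pos (by rw [List.length_drop]; omega)
      have e1 : allStarACore (l.take (l.length / 2)) = allStarBCore (l.take (l.length / 2)) :=
        ih _ (by rw [List.length_take]; omega) _ rfl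
      have e2 : allStarACore (l.drop (l.length / 2)) = allStarBCore (l.drop (l.length / 2)) :=
        ih _ (by rw [List.length_drop]; omega) _ rfl
      have hsplit : allStarBCore l = allStarBCore (l.take (l.length / 2) ++ l.drop (l.length / 2)) := by
        rw [List.take_append_drop]
      rw [hsplit, bCore_append _ _ hx hy]
      split_ifs with hc <;> rw [e1, e2]

-- ===== VERDICT (by name: the statement is the Claim_ definition above) =====
theorem all_star_spec : Claim_equal_all_star := by
  intro s _
  unfold Spec_all_star all_star all_star_alt
  rw [core_eq s.toList.length s.toList rfl]
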